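-- pv_equiv track=rewrite | github.com/archeonsol/underspire | world/rpg/tailoring.py | get_quality_for_result
-- ===== SOURCE A (Python) =====
-- QUALITY_TIERS = [
--     (0, "ragged", 0),
--     (10, "tattered", 10),
--     (20, "shoddy", 20),
--     (30, "cheap", 30),
--     (40, "plain", 40),
--     (50, "decent", 50),
--     (60, "well-made", 60),
--     (70, "stylish", 70),
--     (80, "fashionable", 80),
--     (90, "designer", 90),
--     (100, "luxurious", 100),
-- ]
--
-- def get_quality_for_result(result):
--     """
--     Map a tailoring roll result (int) to (adjective, quality_score 0-100).
--     quality_score is used to average outfit quality when displaying "Their outfit is X."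
--     """
--     result = max(0, min(100, int(result)))
--     adjective = "basic"
--     score = 70
--     for min_result, adj, qscore in reversed(QUALITY_TIERS):
--         if result >= min_result:
--             adjective = adj
--             score = qscore
--             break
--     return adjective, score
-- ===== SOURCE B (Python) =====
-- ADJECTIVES = ("ragged", "tattered", "shoddy", "cheap", "plain", "decent",
--               "well-made", "stylish", "fashionable", "designer", "luxurious")
--
-- def get_quality_for_result(result):
--     r = max(0, min(100, int(result)))
--     idx = r // 10
--     return ADJECTIVES[idx], idx * 10
-- ===== Notes on version B (the rewrite author's own statement) =====
-- stated objective: simpler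
-- what changed: Replaces the reversed linear scan over QUALITY_TIERS (with break and unreachable default entry) by a closed-form index, floor division of the clamped roll by ten, into a parallel adjective tuple, with the score recomputed from that index.
import Mathlib
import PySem

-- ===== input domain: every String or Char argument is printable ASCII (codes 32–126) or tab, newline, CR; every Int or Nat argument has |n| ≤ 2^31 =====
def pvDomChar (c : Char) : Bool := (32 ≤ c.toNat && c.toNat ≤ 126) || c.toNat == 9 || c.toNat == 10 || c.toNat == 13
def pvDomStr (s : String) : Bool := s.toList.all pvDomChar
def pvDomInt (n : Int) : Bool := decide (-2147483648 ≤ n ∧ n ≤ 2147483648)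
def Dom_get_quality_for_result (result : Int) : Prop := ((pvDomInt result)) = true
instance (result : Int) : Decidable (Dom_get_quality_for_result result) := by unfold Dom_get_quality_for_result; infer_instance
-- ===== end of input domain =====

-- B replaces the reversed scan with a closed-form index r // 10 into a parallel adjective list (objective: simpler).

-- ===== PORT A =====
def qualityTiers : List (Int × String × Int) :=
  [(0, "ragged", 0), (10, "tattered", 10), (20, "shoddy", 20), (30, "cheap", 30),
   (40, "plain", 40), (50, "decent", 50), (60, "well-made", 60), (70, "stylish", 70),
   (80, "fashionable", 80), (90, "designer", 90), (100, "luxurious", 100)]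

-- the for-loop with break over reversed(QUALITY_TIERS); falls through to the initial ("basic", 70)
def tierLoop (r : Int) : List (Int × String × Int) → String × Int
  | [] => ("basic", 70)
  | (minResult, adj, qscore) :: rest => if r ≥ minResult then (adj, qscore) else tierLoop r rest

def get_quality_for_result (result : Int) : String × Int :=
  tierLoop (max 0 (min 100 result)) qualityTiers.reverse

-- ===== PORT B =====
def adjectivesB : List String :=
  ["ragged", "tattered", "shoddy", "cheap", "plain", "decent",
   "well-made", "stylish", "fashionable", "designer", "luxurious"]

def get_quality_for_result_alt (result : Int) : String × Int :=
  let r := max 0 (min 100 result)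
  let idx := PySem.Int.floordiv r 10
  ((PySem.List.pyGet? adjectivesB idx).getD "", idx * 10)

-- ===== PRECONDITION & SPEC =====
def Spec_get_quality_for_result (result : Int) (out : String × Int) : Prop := out = get_quality_for_result_alt result
instance (result : Int) (out : String × Int) : Decidable (Spec_get_quality_for_result result out) := by unfold Spec_get_quality_for_result; infer_instance

-- ===== CLAIM (what is proved, stated in full; the proofs are below) =====
def Claim_equal_get_quality_for_result : Prop := ∀ (result : Int), Dom_get_quality_for_result result → Spec_get_quality_for_result result (get_quality_for_result result)

-- ===== LEMMAS AND PROOFS =====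
theorem clamp_agree (c : Int) (h0 : 0 ≤ c) (h1 : c ≤ 100) :
    tierLoop c qualityTiers.reverse
      = ((PySem.List.pyGet? adjectivesB (PySem.Int.floordiv c 10)).getD "",
         PySem.Int.floordiv c 10 * 10) := by
  interval_cases c <;> decide

-- ===== VERDICT (by name: the statement is the Claim_ definition above) =====
theorem get_quality_for_result_spec : Claim_equal_get_quality_for_result := by
  intro result _
  unfold Spec_get_quality_for_result get_quality_for_result get_quality_for_result_alt
  exact clamp_agree _ (by omega) (by omega)
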